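-- pv_equiv track=rewrite | github.com/vicfernan/leetcode | Decode Last Digit Pyramid/decode-last-digit-pyramid.py | last_numbers_pyramid
-- ===== SOURCE A (Python) =====
-- def last_numbers_pyramid(number):
-- 	result = []
-- 	current = 1
-- 	line = 1
--
-- 	while current <= number:
-- 		start = current
-- 		end = start + line - 1
-- 		result.append(end)
-- 		current = end + 1
-- 		line += 1
--
-- 	return result
-- ===== SOURCE B (Python) =====
-- import math
--
-- def last_numbers_pyramid(number):
--     if number < 1:
--         return []
--     n = (math.isqrt(8 * (number - 1) + 1) + 1) // 2
--     return [k * (k + 1) // 2 for k in range(1, n + 1)]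
-- ===== Notes on version B (the rewrite author's own statement) =====
-- stated objective: simpler
-- what changed: Replaced A's while loop carrying running current/line accumulators by a closed-form count of lines via math.isqrt and a direct triangular-number comprehension k*(k+1)//2.
import Mathlib
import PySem

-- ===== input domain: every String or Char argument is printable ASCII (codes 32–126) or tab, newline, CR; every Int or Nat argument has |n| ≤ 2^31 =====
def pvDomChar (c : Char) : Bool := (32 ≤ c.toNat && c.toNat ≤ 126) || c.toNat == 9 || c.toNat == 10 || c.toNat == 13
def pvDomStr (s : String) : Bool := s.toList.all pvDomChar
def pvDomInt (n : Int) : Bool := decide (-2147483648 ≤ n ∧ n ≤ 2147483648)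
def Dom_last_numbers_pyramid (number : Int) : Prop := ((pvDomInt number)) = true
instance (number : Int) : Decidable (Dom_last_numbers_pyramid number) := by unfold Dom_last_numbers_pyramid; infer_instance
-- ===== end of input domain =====

-- B replaces A's running-accumulator while loop by a closed-form count (via isqrt) plus a
-- direct triangular-number comprehension; objective: simpler.

-- ===== PORT A =====
-- the while loop of A; `hline` is only a termination aid (line starts at 1 and only increments)
def pvLoopA (number current line : Int) (hline : 1 ≤ line) : List Int :=
  if _h : current ≤ number then
    (current + line - 1) :: pvLoopA number (current + line - 1 + 1) (line + 1) (by omega)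
  else []
termination_by (number + 1 - current).toNat
decreasing_by omega

def last_numbers_pyramid (number : Int) : List Int := pvLoopA number 1 1 (by norm_num)

-- ===== PORT B =====
def last_numbers_pyramid_alt (number : Int) : List Int :=
  if number < 1 then []
  else
    let n : Int := PySem.Int.floordiv ((Nat.sqrt (8 * (number - 1) + 1).toNat : Int) + 1) 2
    (PySem.List.pyRange 1 (n + 1) 1).map (fun k => PySem.Int.floordiv (k * (k + 1)) 2)

-- ===== PRECONDITION & SPEC =====
def Spec_last_numbers_pyramid (number : Int) (out : List Int) : Prop := out = last_numbers_pyramid_alt number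
instance (number : Int) (out : List Int) : Decidable (Spec_last_numbers_pyramid number out) := by unfold Spec_last_numbers_pyramid; infer_instance

-- ===== CLAIM (what is proved, stated in full; the proofs are below) =====
def Claim_equal_last_numbers_pyramid : Prop := ∀ (number : Int), Dom_last_numbers_pyramid number → Spec_last_numbers_pyramid number (last_numbers_pyramid number)

-- ===== LEMMAS AND PROOFS =====

-- triangular number, exactly the function B maps over the range
def pvT (x : Int) : Int := PySem.Int.floordiv (x * (x + 1)) 2

-- the count of lines B computes
def pvN (number : Int) : Int :=
  PySem.Int.floordiv ((Nat.sqrt (8 * (number - 1) + 1).toNat : Int) + 1) 2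

theorem pvT_two_mul (x : Int) : 2 * pvT x = x * (x + 1) := by
  unfold pvT
  rw [PySem.Int.floordiv_eq_ediv_of_pos (by norm_num)]
  exact Int.mul_ediv_cancel' (Int.even_mul_succ_self x).two_dvd

theorem pvT_step (l : Int) : pvT (l - 1) + l = pvT l := by
  have h1 := pvT_two_mul (l - 1)
  have h2 := pvT_two_mul l
  nlinarith [h1, h2]

-- the closed-form cutoff: line l still starts within `number` iff l ≤ pvN number
theorem le_pvN_iff (number l : Int) (hnum : 1 ≤ number) (hl : 1 ≤ l) :
    l ≤ pvN number ↔ pvT (l - 1) + 1 ≤ number := by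
  unfold pvN
  rw [PySem.Int.floordiv_eq_ediv_of_pos (by norm_num)]
  rw [Int.le_ediv_iff_mul_le (by norm_num)]
  have hm : ((8 * (number - 1) + 1).toNat : Int) = 8 * (number - 1) + 1 := by omega
  constructor
  · intro h
    -- 2l - 1 ≤ sqrt m, so (2l-1)^2 ≤ m
    have hk : ((2 * l - 1).toNat : Int) = 2 * l - 1 := by omega
    have hle : (2 * l - 1).toNat ≤ Nat.sqrt (8 * (number - 1) + 1).toNat := by omega
    have hsq := Nat.sqrt_le_sqrt (Nat.sqrt_le_self (8 * (number - 1) + 1).toNat)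
    have h2 := (Nat.le_sqrt.mp hle)
    have h3 : ((2 * l - 1).toNat * (2 * l - 1).toNat : Int) ≤ ((8 * (number - 1) + 1).toNat : Int) := by
      exact_mod_cast h2
    rw [hk, hm] at h3
    have hT := pvT_two_mul (l - 1)
    nlinarith [h3, hT]
  · intro h
    have hT := pvT_two_mul (l - 1)
    have h3 : (2 * l - 1) * (2 * l - 1) ≤ 8 * (number - 1) + 1 := by nlinarith [hT]
    have hk : ((2 * l - 1).toNat : Int) = 2 * l - 1 := by omega
    have h4 : (2 * l - 1).toNat * (2 * l - 1).toNat ≤ (8 * (number - 1) + 1).toNat := by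
      have : ((2 * l - 1).toNat * (2 * l - 1).toNat : Int) ≤ ((8 * (number - 1) + 1).toNat : Int) := by
        rw [hk, hm]; exact h3
      exact_mod_cast this
    have h5 := Nat.le_sqrt.mpr h4
    omega

-- loop invariant: starting line l with current = T(l-1)+1, the loop emits T l, T (l+1), …, T (pvN number)
theorem pvLoopA_eq (m : Nat) : ∀ (number l : Int) (_hnum : 1 ≤ number) (hl : 1 ≤ l),
    (pvN number + 1 - l).toNat = m →
    pvLoopA number (pvT (l - 1) + 1) l hl = (PySem.List.pyRange l (pvN number + 1) 1).map pvT := by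
  induction m with
  | zero =>
    intro number l _hnum hl hm
    have hgt : ¬ (pvT (l - 1) + 1 ≤ number) := by
      rw [← le_pvN_iff number l (by omega) hl]; omega
    rw [pvLoopA, dif_neg hgt, PySem.List.pyRange_one_eq_nil (by omega)]
    simp
  | succ m ih =>
    intro number l hnum hl hm
    have hle : l ≤ pvN number := by omega
    have hcur : pvT (l - 1) + 1 ≤ number := (le_pvN_iff number l hnum hl).mp hle
    have hhead : pvT (l - 1) + 1 + l - 1 = pvT l := by have := pvT_step l; omega
    rw [pvLoopA, dif_pos hcur, PySem.List.pyRange_one_cons (by omega), List.map_cons, hhead]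
    have hIH := ih number (l + 1) hnum (by omega) (by omega)
    have hll : l + 1 - 1 = l := by ring
    rw [hll] at hIH
    exact congrArg (pvT l :: ·) hIH

-- ===== VERDICT (by name: the statement is the Claim_ definition above) =====
theorem last_numbers_pyramid_spec : Claim_equal_last_numbers_pyramid := by
  intro number _
  unfold Spec_last_numbers_pyramid last_numbers_pyramid last_numbers_pyramid_alt
  by_cases hnum : number < 1
  · rw [if_pos hnum, pvLoopA, dif_neg (by omega)]
  · rw [if_neg hnum]
    have h1 : (1 : Int) ≤ number := by omega
    have := pvLoopA_eq (pvN number + 1 - 1).toNat number 1 h1 (by norm_num) rfl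
    have hT0 : pvT (1 - 1) + 1 = 1 := by norm_num [pvT, PySem.Int.floordiv]
    rw [hT0] at this
    rw [this]
    rfl
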